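-- pv_equiv track=rewrite | github.com/aidanstout/220 | assignments/hw9/hw9.py | make_hidden_secret
-- ===== SOURCE A (Python) =====
-- def make_hidden_secret(secret_word, guesses):
--     word_len = len(secret_word)
--     hidden = ""
--     for i in range(word_len):
--         hidden = hidden + ' _'
--     hidden.strip()
--     for letter in secret_word:
--         if letter in guesses:
--             hidden.replace('_', letter)
--     return hidden
-- ===== SOURCE B (Python) =====
-- def make_hidden_secret(secret_word, guesses):
--     # A's strip/replace results are discarded; the net effect is just ' _' per character.
--     return ' _' * len(secret_word)
-- ===== Notes on version B (the rewrite author's own statement) =====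
-- stated objective: simpler
-- what changed: Replaced A's loop that accumulates ' _' per character (plus a dead membership loop whose strip/replace results are discarded) with the closed-form string multiplication ' _' * len(secret_word).
import Mathlib
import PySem

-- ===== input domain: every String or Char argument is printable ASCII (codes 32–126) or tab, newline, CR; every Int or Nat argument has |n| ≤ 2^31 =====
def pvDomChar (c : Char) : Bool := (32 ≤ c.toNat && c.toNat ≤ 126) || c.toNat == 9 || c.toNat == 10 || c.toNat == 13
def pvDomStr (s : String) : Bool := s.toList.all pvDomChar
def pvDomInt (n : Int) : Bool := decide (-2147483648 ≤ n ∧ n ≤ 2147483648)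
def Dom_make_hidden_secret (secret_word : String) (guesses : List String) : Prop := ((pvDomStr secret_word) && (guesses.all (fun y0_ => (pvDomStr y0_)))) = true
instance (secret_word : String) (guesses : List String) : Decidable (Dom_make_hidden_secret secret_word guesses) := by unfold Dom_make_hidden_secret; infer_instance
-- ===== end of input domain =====

-- B replaces A's character-by-character ' _' accumulation (and a dead strip/replace loop) with the closed form ' _' * len(secret_word); return values agree on all inputs.

-- ===== PORT A =====
def make_hidden_secret (secret_word : String) (guesses : List String) : String :=
  let word_len := PySem.Str.len secret_word
  let hidden : List Char :=
    (PySem.List.pyRange 0 word_len).foldl (fun h _ => h ++ [' ', '_']) []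
  let _ := PySem.Chars.strip hidden      -- hidden.strip(): result discarded, as in A
  let hidden :=
    secret_word.toList.foldl (fun h letter =>
      if guesses.contains (String.ofList [letter]) then
        let _ := PySem.Chars.replace h ['_'] [letter]   -- hidden.replace('_', letter): result discarded, as in A
        h
      else h) hidden
  String.ofList hidden

-- ===== PORT B =====
def make_hidden_secret_alt (secret_word : String) (guesses : List String) : String :=
  String.ofList (PySem.List.pyRepeat [' ', '_'] (PySem.Str.len secret_word))

-- ===== PRECONDITION & SPEC =====
def Spec_make_hidden_secret (secret_word : String) (guesses : List String) (out : String) : Prop := out = make_hidden_secret_alt secret_word guesses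
instance (secret_word : String) (guesses : List String) (out : String) : Decidable (Spec_make_hidden_secret secret_word guesses out) := by unfold Spec_make_hidden_secret; infer_instance

-- ===== CLAIM (what is proved, stated in full; the proofs are below) =====
def Claim_equal_make_hidden_secret : Prop := ∀ (secret_word : String) (guesses : List String), Dom_make_hidden_secret secret_word guesses → Spec_make_hidden_secret secret_word guesses (make_hidden_secret secret_word guesses)

-- ===== LEMMAS AND PROOFS =====
-- The dead second loop never changes the accumulator.
theorem pv_dead_loop (g : List String) (l : List Char) (acc : List Char) :
    l.foldl (fun h letter =>
      if g.contains (String.ofList [letter]) then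
        let _ := PySem.Chars.replace h ['_'] [letter]
        h
      else h) acc = acc := by
  induction l generalizing acc with
  | nil => rfl
  | cons c l ih => simp [List.foldl]

-- The building loop appends one copy of cs per list element.
theorem pv_build_loop (cs : List Char) (l : List Int) (acc : List Char) :
    l.foldl (fun h _ => h ++ cs) acc = acc ++ (List.replicate l.length cs).flatten := by
  induction l generalizing acc with
  | nil => simp
  | cons x l ih => simp [List.foldl, ih, List.replicate_succ]

-- ===== VERDICT (by name: the statement is the Claim_ definition above) =====
theorem make_hidden_secret_spec : Claim_equal_make_hidden_secret := by
  intro s g _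
  unfold Spec_make_hidden_secret make_hidden_secret make_hidden_secret_alt
  simp only [pv_dead_loop, PySem.Str.len,
    PySem.List.pyRange_zero_natCast, pv_build_loop, PySem.List.pyRepeat]
  simp
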